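-- pv_equiv track=rewrite | github.com/mkimkor/Parallel-Data-Processing | parallel.py | rr_partition
-- ===== SOURCE A (Python) =====
-- def rr_partition(data, n):
--     result = []
--     for i in range(n):
--         result.append([])
--
--     n_bin = len(data)/n
--
--     for index, element in enumerate(data):
--         index_bin = (int) (index % n)
--         result[index_bin].append(element)
--
--     return result
-- ===== SOURCE B (Python) =====
-- def rr_partition(data, n):
--     n_bin = len(data)/n
--     return [data[i::n] for i in range(n)]
-- ===== Notes on version B (the rewrite author's own statement) =====
-- stated objective: idiomatic
-- what changed: B builds each bin with one strided slice data[i::n] in a comprehension instead of scattering elements one at a time into result[index % n]; the dead len(data)/n is kept so n==0 still raises ZeroDivisionError.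
import Mathlib
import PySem

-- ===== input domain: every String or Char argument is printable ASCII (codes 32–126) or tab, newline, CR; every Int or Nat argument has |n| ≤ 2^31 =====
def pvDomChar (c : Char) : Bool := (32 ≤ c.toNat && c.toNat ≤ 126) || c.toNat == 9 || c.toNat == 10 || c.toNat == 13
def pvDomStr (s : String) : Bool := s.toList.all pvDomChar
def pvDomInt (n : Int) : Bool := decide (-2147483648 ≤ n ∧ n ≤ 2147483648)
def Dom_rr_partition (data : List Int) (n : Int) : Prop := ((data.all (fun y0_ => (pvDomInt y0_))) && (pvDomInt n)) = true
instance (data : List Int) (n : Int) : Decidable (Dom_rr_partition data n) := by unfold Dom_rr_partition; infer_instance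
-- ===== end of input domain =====

-- B replaces A's one-pass scatter into result[index % n] by one strided slice data[i::n] per bin
-- (same cost, more idiomatic); the dead len(data)/n is kept so n == 0 still raises.

-- ===== PORT A =====
-- result[i].append(x) for a Python index i (negative wraps); none from pyIdx? = IndexError, excluded by Pre_
def pvAppendAt (rs : List (List Int)) (i : Int) (x : Int) : List (List Int) :=
  match PySem.List.pyIdx? rs.length i with
  | some k => rs.set k (rs.getD k [] ++ [x])
  | none => rs

def rr_partition (data : List Int) (n : Int) : List (List Int) :=
  -- n_bin = len(data)/n : float, unused; raises ZeroDivisionError iff n = 0, excluded by Pre_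
  -- for index, element in enumerate(data): result[int(index % n)].append(element)
  (PySem.List.enumerate data 0).foldl
    (fun r p => pvAppendAt r (PySem.Int.mod p.1 n) p.2)
    -- result = []; for i in range(n): result.append([])
    ((PySem.List.pyRange 0 n 1).foldl (fun r _ => r ++ [([] : List Int)]) [])

-- ===== PORT B =====
def rr_partition_alt (data : List Int) (n : Int) : List (List Int) :=
  -- n_bin = len(data)/n raises iff n = 0, excluded by Pre_
  -- [data[i::n] for i in range(n)]; slice? is none only for step 0, i.e. n = 0, excluded by Pre_
  (PySem.List.pyRange 0 n 1).foldl
    (fun acc i => acc ++ [(PySem.List.slice? data (some i) none n).getD []]) []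

-- ===== PRECONDITION & SPEC =====
-- Pre_ excludes n = 0 (A raises ZeroDivisionError at len(data)/n) and n < 0 with nonempty data
-- (A raises IndexError: result is empty but result[index % n] is indexed).
def Pre_rr_partition (data : List Int) (n : Int) : Prop := 0 < n ∨ (n < 0 ∧ data = [])
instance (data : List Int) (n : Int) : Decidable (Pre_rr_partition data n) := by
  unfold Pre_rr_partition; infer_instance

def pvWitness_rr_partition : List Int × Int := ([1, 2, 3, 4, 5], 2)

def Spec_rr_partition (data : List Int) (n : Int) (out : List (List Int)) : Prop := out = rr_partition_alt data n
instance (data : List Int) (n : Int) (out : List (List Int)) : Decidable (Spec_rr_partition data n out) := by unfold Spec_rr_partition; infer_instance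

-- ===== CLAIM (what is proved, stated in full; the proofs are below) =====
def Claim_equal_rr_partition : Prop := ∀ (data : List Int) (n : Int), Dom_rr_partition data n → Pre_rr_partition data n → Spec_rr_partition data n (rr_partition data n)

-- ===== LEMMAS AND PROOFS =====

-- the elements of xs landing in bin i, in order (positions congruent to i mod n)
def pvBucket (xs : List Int) (s n : Int) (i : Nat) : List Int :=
  (PySem.List.enumerate xs s).filterMap
    (fun p => if (PySem.Int.mod p.1 n).toNat = i then some p.2 else none)

lemma pvBucket_nil (s n : Int) (i : Nat) : pvBucket [] s n i = [] := by
  simp [pvBucket, PySem.List.enumerate_nil]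

lemma pvBucket_cons (x : Int) (xs : List Int) (s n : Int) (i : Nat) :
    pvBucket (x :: xs) s n i
      = (if (PySem.Int.mod s n).toNat = i then [x] else []) ++ pvBucket xs (s + 1) n i := by
  simp only [pvBucket, PySem.List.enumerate_cons, List.filterMap_cons]
  split_ifs <;> simp

lemma pvBucket_append_singleton (ys : List Int) (x n : Int) (i : Nat) :
    pvBucket (ys ++ [x]) 0 n i
      = pvBucket ys 0 n i
        ++ (if (PySem.Int.mod (ys.length : Int) n).toNat = i then [x] else []) := by
  simp only [pvBucket, PySem.List.enumerate_append, List.filterMap_append,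
    PySem.List.enumerate_cons, PySem.List.enumerate_nil, List.filterMap_cons, List.filterMap_nil,
    zero_add]
  split_ifs with h <;> simp

lemma pvAppendAt_getD (r : List (List Int)) (j : Int) (hj0 : 0 ≤ j) (hjlen : j < (r.length : Int))
    (x : Int) (i : Nat) (hi : i < r.length) :
    (pvAppendAt r j x).getD i [] = r.getD i [] ++ (if j.toNat = i then [x] else []) := by
  have hidx : PySem.List.pyIdx? r.length j = some j.toNat := by
    simp [PySem.List.pyIdx?, hj0, hjlen]
  simp only [pvAppendAt, hidx]
  simp only [List.getD_eq_getElem?_getD, List.getElem?_set]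
  split_ifs with h1 h2
  · subst h1
    simp
  · omega
  · simp

lemma pvAppendAt_length (r : List (List Int)) (j x : Int) :
    (pvAppendAt r j x).length = r.length := by
  unfold pvAppendAt
  cases h : PySem.List.pyIdx? r.length j <;> simp

lemma scatter_inv (n : Int) (hn : 0 < n) (xs : List Int) :
    ∀ (s : Int), 0 ≤ s → ∀ (r : List (List Int)), r.length = n.toNat →
      (PySem.List.enumerate xs s).foldl (fun r p => pvAppendAt r (PySem.Int.mod p.1 n) p.2) r
        = (List.range n.toNat).map (fun i => r.getD i [] ++ pvBucket xs s n i) := by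
  induction xs with
  | nil =>
    intro s _ r hr
    simp only [PySem.List.enumerate_nil, List.foldl_nil]
    apply List.ext_getElem (by simp [hr])
    intro k h1 h2
    simp [pvBucket_nil, List.getD_eq_getElem?_getD, List.getElem?_eq_getElem h1]
  | cons x xs ih =>
    intro s hs r hr
    rw [PySem.List.enumerate_cons, List.foldl_cons]
    rw [ih (s + 1) (by omega) _ (by rw [pvAppendAt_length]; exact hr)]
    apply List.map_congr_left
    intro i hi
    rw [List.mem_range] at hi
    have hmn : ((n.toNat : Nat) : Int) = n := Int.toNat_of_nonneg hn.le
    have h0m : 0 ≤ PySem.Int.mod s n := PySem.Int.mod_nonneg s hn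
    have hmlt : PySem.Int.mod s n < n := PySem.Int.mod_lt s hn
    have hlm : PySem.Int.mod s n < (r.length : Int) := by rw [hr]; omega
    rw [pvAppendAt_getD r _ h0m hlm x i (by rw [hr]; exact hi), pvBucket_cons, List.append_assoc]

-- ceiling-division arithmetic used to count the elements of a strided slice
lemma ceil_bounds (n t : Int) (hn : 0 < n) (_ht : 0 ≤ t) :
    (t + n - 1) / n = t / n + (if t % n = 0 then 0 else 1) ∧ (t + n) / n = t / n + 1 := by
  have hdm := Int.mul_ediv_add_emod t n
  have hr0 : 0 ≤ t % n := Int.emod_nonneg t hn.ne'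
  have hrn : t % n < n := Int.emod_lt_of_pos t hn
  set q := t / n with hq
  set r := t % n with hr
  constructor
  · have h1 : t + n - 1 = (r + n - 1) + n * q := by linear_combination -hdm
    rw [h1, Int.add_mul_ediv_left _ _ hn.ne']
    by_cases h : r = 0
    · rw [if_pos h, Int.ediv_eq_zero_of_lt (by omega) (by omega)]
      omega
    · rw [if_neg h]
      have h2 : r + n - 1 = (r - 1) + n * 1 := by ring
      rw [h2, Int.add_mul_ediv_left _ _ hn.ne',
        Int.ediv_eq_zero_of_lt (by omega) (by omega)]
      omega
  · have h1 : t + n = r + n * (q + 1) := by linear_combination -hdm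
    rw [h1, Int.add_mul_ediv_left _ _ hn.ne', Int.ediv_eq_zero_of_lt hr0 hrn]
    omega

-- closed form of data[i::n] for 0 ≤ i, 0 < n, read off slice?'s definition
lemma slice?_pos (xs : List Int) (i n : Int) (h0 : 0 ≤ i) (hn : 0 < n) :
    PySem.List.slice? xs (some i) none n
      = some ((List.range (if min i (xs.length : Int) < (xs.length : Int)
              then (((xs.length : Int) - min i (xs.length : Int) + n - 1) / n).toNat else 0)).filterMap
          (fun (k : Nat) => xs[(min i (xs.length : Int) + n * ((k : Nat) : Int)).toNat]?)) := by
  simp [PySem.List.slice?, PySem.List.sliceIndices, hn.ne', not_lt.mpr hn.le, not_lt.mpr h0, hn]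

lemma strided_eq_bucket (n i : Int) (hn : 0 < n) (hi0 : 0 ≤ i) (hin : i < n) (xs : List Int) :
    (List.range (if min i (xs.length : Int) < (xs.length : Int)
        then (((xs.length : Int) - min i (xs.length : Int) + n - 1) / n).toNat else 0)).filterMap
      (fun (k : Nat) => xs[(min i (xs.length : Int) + n * ((k : Nat) : Int)).toNat]?)
      = pvBucket xs 0 n i.toNat := by
  induction xs using List.reverseRecOn with
  | nil =>
    rw [if_neg (by simp only [List.length_nil, Nat.cast_zero]; omega)]
    simp [pvBucket_nil]
  | append_singleton ys x ih =>
    rw [pvBucket_append_singleton, ← ih, PySem.Int.mod_eq_emod_of_pos hn]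
    set L := (ys.length : Int) with hL
    have hL0 : 0 ≤ L := by positivity
    have hlen' : (((ys ++ [x]).length : Nat) : Int) = L + 1 := by
      simp [hL, List.length_append]
    rw [hlen']
    by_cases hiL : i ≤ L
    · have hmin : min i (L + 1) = i := by omega
      have hmin2 : min i L = i := by omega
      rw [hmin, hmin2, if_pos (by omega : i < L + 1)]
      have hid := Int.mul_ediv_add_emod (L - i) n
      set q := (L - i) / n with hq
      set r := (L - i) % n with hr
      have hr0 : 0 ≤ r := Int.emod_nonneg _ hn.ne'
      have hrn : r < n := Int.emod_lt_of_pos _ hn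
      have hq0 : 0 ≤ q := Int.ediv_nonneg (by omega) hn.le
      have hcnt : (L + 1 - i + n - 1) / n = q + 1 := by
        have h2 := (ceil_bounds n (L - i) hn (by omega)).2
        have harg : L + 1 - i + n - 1 = L - i + n := by ring
        rw [harg, h2]
      have hcntys : (if i < L then ((L - i + n - 1) / n).toNat else 0)
          = (q + if r = 0 then 0 else 1).toNat := by
        by_cases h : i < L
        · rw [if_pos h, (ceil_bounds n (L - i) hn (by omega)).1]
        · have hiL' : i = L := by omega
          have hq0' : q = 0 := by rw [hq, hiL']; simp
          have hr0' : r = 0 := by rw [hr, hiL']; simp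
          rw [if_neg h]
          simp [hq0', hr0']
      have hmodL : L % n = i ↔ r = 0 := by
        constructor
        · intro h
          exact Int.emod_eq_emod_iff_emod_sub_eq_zero.mp
            (by rw [h, Int.emod_eq_of_lt hi0 hin])
        · intro h
          have h2 := Int.emod_eq_emod_iff_emod_sub_eq_zero.mpr h
          rw [Int.emod_eq_of_lt hi0 hin] at h2
          exact h2
      by_cases hrz : r = 0
      · have hLi : L % n = i := hmodL.mpr hrz
        have hcnt2 : (if i < L then ((L - i + n - 1) / n).toNat else 0) = q.toNat := by
          rw [hcntys, if_pos hrz]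
          omega
        have htn : (q + 1).toNat = q.toNat + 1 := by omega
        rw [if_pos (show (L % n).toNat = i.toNat by rw [hLi]), hcnt, hcnt2, htn,
          List.range_succ, List.filterMap_append]
        congr 1
        · apply List.filterMap_congr
          intro k hk
          rw [List.mem_range] at hk
          have hk' : (i + n * (k : Int)).toNat < ys.length := by
            have h1 : (k : Int) ≤ q - 1 := by omega
            have h2 : n * (k : Int) ≤ n * (q - 1) := by
              exact mul_le_mul_of_nonneg_left h1 hn.le
            have h3 : n * (q - 1) = n * q - n := by ring
            have h4 : i + n * (k : Int) < L := by linarith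
            rw [hL] at h4
            have h5 : (0 : Int) ≤ n * (k : Int) := by positivity
            omega
          rw [List.getElem?_append_left hk']
        · have hidx2 : (i + n * ((q.toNat : Nat) : Int)).toNat = ys.length := by
            have hcast : ((q.toNat : Nat) : Int) = q := by omega
            rw [hcast]
            have h5 : i + n * q = L := by linarith
            omega
          simp only [List.filterMap_cons, List.filterMap_nil]
          rw [hidx2, List.getElem?_concat_length]
      · have hLi : ¬ (L % n).toNat = i.toNat := by
          intro h
          apply hrz
          apply hmodL.mp
          have hl0 : 0 ≤ L % n := Int.emod_nonneg _ hn.ne'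
          omega
        have hcnt2 : (if i < L then ((L - i + n - 1) / n).toNat else 0) = (q + 1).toNat := by
          rw [hcntys, if_neg hrz]
        rw [if_neg hLi, List.append_nil, hcnt, hcnt2]
        apply List.filterMap_congr
        intro k hk
        rw [List.mem_range] at hk
        have hk' : (i + n * (k : Int)).toNat < ys.length := by
          have h1 : (k : Int) ≤ q := by omega
          have h2 : n * (k : Int) ≤ n * q := mul_le_mul_of_nonneg_left h1 hn.le
          have hr1 : (1 : Int) ≤ r := by omega
          have h4 : i + n * (k : Int) < L := by linarith
          rw [hL] at h4
          have h5 : (0 : Int) ≤ n * (k : Int) := by positivity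
          omega
        rw [List.getElem?_append_left hk']
    · have hmin : min i (L + 1) = L + 1 := by omega
      have hmin2 : min i L = L := by omega
      rw [hmin, hmin2, if_neg (by omega), if_neg (lt_irrefl L)]
      have hLL : L % n = L := Int.emod_eq_of_lt hL0 (by omega)
      rw [if_neg (by omega : ¬ (L % n).toNat = i.toNat)]
      simp

lemma alt_eq (data : List Int) (n : Int) (hn : 0 < n) :
    rr_partition_alt data n = (List.range n.toNat).map (fun i => pvBucket data 0 n i) := by
  have hpr : PySem.List.pyRange 0 n 1 = (List.range n.toNat).map (fun k => ((k : Nat) : Int)) := by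
    conv_lhs => rw [show n = ((n.toNat : Nat) : Int) from (Int.toNat_of_nonneg hn.le).symm]
    exact PySem.List.pyRange_zero_natCast n.toNat
  unfold rr_partition_alt
  rw [hpr, List.foldl_map, PySem.List.foldl_append_singleton_eq_map]
  simp only [List.nil_append]
  apply List.map_congr_left
  intro i hi
  rw [List.mem_range] at hi
  have hi0 : (0 : Int) ≤ (i : Int) := by positivity
  have hin : ((i : Nat) : Int) < n := by omega
  rw [slice?_pos data i n hi0 hn]
  simp only [Option.getD_some]
  rw [strided_eq_bucket n i hn hi0 hin data]
  simp

lemma a_eq (data : List Int) (n : Int) (hn : 0 < n) :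
    rr_partition data n = (List.range n.toNat).map (fun i => pvBucket data 0 n i) := by
  have hpr : PySem.List.pyRange 0 n 1 = (List.range n.toNat).map (fun k => ((k : Nat) : Int)) := by
    conv_lhs => rw [show n = ((n.toNat : Nat) : Int) from (Int.toNat_of_nonneg hn.le).symm]
    exact PySem.List.pyRange_zero_natCast n.toNat
  have hinit : (PySem.List.pyRange 0 n 1).foldl (fun r _ => r ++ [([] : List Int)]) []
      = List.replicate n.toNat ([] : List Int) := by
    rw [hpr, PySem.List.foldl_append_singleton_eq_map]
    apply List.ext_getElem (by simp)
    intro k h1 h2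
    simp
  unfold rr_partition
  rw [hinit, scatter_inv n hn data 0 le_rfl _ (by simp)]
  apply List.map_congr_left
  intro i hi
  rw [List.mem_range] at hi
  rw [List.getD_replicate _ hi, List.nil_append]

-- ===== VERDICT (by name: the statement is the Claim_ definition above) =====
theorem rr_partition_spec : Claim_equal_rr_partition := by
  intro data n _ hpre
  unfold Spec_rr_partition
  rcases hpre with hn | ⟨hn, hd⟩
  · rw [a_eq data n hn, alt_eq data n hn]
  · subst hd
    have hr : PySem.List.pyRange 0 n 1 = [] := by
      simp [PySem.List.pyRange]
      omega
    simp [rr_partition, rr_partition_alt, hr, PySem.List.enumerate_nil]
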